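-- pv_equiv track=rewrite | github.com/uclid/coding_practice | python/SimilarArrays.py | solution
-- ===== SOURCE A (Python) =====
-- def solution(a, b):
--
--     dict_a = {}
--     for x in a:
--         if x in dict_a.keys():
--             val = dict_a[x]
--             dict_a[x] = val + 1
--         else:
--             dict_a[x] = 1
--
--     dict_b = {}
--     for x in b:
--         if x in dict_b.keys():
--             val = dict_b[x]
--             dict_b[x] = val + 1
--         else:
--             dict_b[x] = 1
--
--     if dict_a != dict_b:
--         return False
--
--     unequal_counts = 0;
--     for i in range(0,len(a)):
--         if a[i] != b[i]:
--             unequal_counts += 1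
--         if unequal_counts > 2:
--             return False
--
--     return True
-- ===== SOURCE B (Python) =====
-- def solution(a, b):
--     if len(a) != len(b):
--         return False
--     diffs = [(x, y) for x, y in zip(a, b) if x != y]
--     return len(diffs) <= 2 and sorted(x for x, _ in diffs) == sorted(y for _, y in diffs)
-- ===== Notes on version B (the rewrite author's own statement) =====
-- stated objective: simpler
-- what changed: Instead of building two full frequency dicts, comparing them, and re-scanning by index with an early-exit counter, B makes one pass over zip(a,b) collecting only the mismatched pairs and returns len(diffs) <= 2 and sorted(first components) == sorted(second components), since matched positions cancel from the multiset comparison.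
import Mathlib
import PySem

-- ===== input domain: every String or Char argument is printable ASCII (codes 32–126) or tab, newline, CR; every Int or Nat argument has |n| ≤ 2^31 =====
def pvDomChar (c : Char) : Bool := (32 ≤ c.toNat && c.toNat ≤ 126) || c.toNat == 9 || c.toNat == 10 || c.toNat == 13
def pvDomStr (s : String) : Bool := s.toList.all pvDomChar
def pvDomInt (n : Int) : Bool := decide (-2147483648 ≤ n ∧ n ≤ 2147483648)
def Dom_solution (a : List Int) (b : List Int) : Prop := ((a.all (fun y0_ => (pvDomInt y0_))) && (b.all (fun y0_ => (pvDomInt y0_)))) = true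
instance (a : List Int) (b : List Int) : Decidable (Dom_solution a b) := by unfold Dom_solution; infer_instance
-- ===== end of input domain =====

-- B replaces A's two full frequency dicts plus an index loop by one pass over zip(a,b)
-- collecting only the mismatched pairs (objective: simpler — identical positions cancel
-- from the multiset comparison, so only the differing pairs need comparing).

-- ===== PORT A =====
-- A's counting loop: 'if x in dict.keys(): dict[x] = dict[x] + 1 else: dict[x] = 1'
-- (the looked-up value dict[x] is d.getD x 0, exact since the key is present)
def pvBuild (xs : List Int) : PySem.Dict Int Int :=
  xs.foldl (fun d x => if d.contains x then d.insert x (d.getD x 0 + 1) else d.insert x 1)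
    PySem.Dict.empty

-- Python dict equality ignores insertion order: same number of keys and every entry of d1
-- is mapped identically by d2 (keys in a Dict are unique, so this is exact).
def pvDictEq (d1 d2 : PySem.Dict Int Int) : Bool :=
  d1.size == d2.size && d1.items.all (fun p => d2.get? p.1 == some p.2)

-- one step of A's index loop: a[i] != b[i]; the out-of-range cases are unreachable
-- (the loop only runs when the dicts compare equal, which forces equal lengths)
def pvMismatch (a b : List Int) (i : Int) : Bool :=
  match PySem.List.pyGet? a i, PySem.List.pyGet? b i with
  | some x, some y => x ≠ y
  | _, _ => false

-- 'for i in range(0, len(a)): … if unequal_counts > 2: return False'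
def pvLoopA (a b : List Int) : List Int → Int → Bool
  | [], _ => true
  | i :: rest, cnt =>
      let cnt' := if pvMismatch a b i then cnt + 1 else cnt
      if cnt' > 2 then false else pvLoopA a b rest cnt'

def solution (a : List Int) (b : List Int) : Bool :=
  let dictA := pvBuild a
  let dictB := pvBuild b
  if ¬ pvDictEq dictA dictB then false
  else pvLoopA a b (PySem.List.pyRange 0 (a.length : Int) 1) 0

-- ===== PORT B =====
def solution_alt (a : List Int) (b : List Int) : Bool :=
  if a.length ≠ b.length then false
  else
    let diffs := (a.zip b).filter (fun p => p.1 ≠ p.2)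
    decide (diffs.length ≤ 2) &&
      decide (PySem.List.sorted (diffs.map (·.1)) (fun x => x) false =
              PySem.List.sorted (diffs.map (·.2)) (fun x => x) false)

-- ===== PRECONDITION & SPEC =====
def Spec_solution (a : List Int) (b : List Int) (out : Bool) : Prop := out = solution_alt a b
instance (a : List Int) (b : List Int) (out : Bool) : Decidable (Spec_solution a b out) := by unfold Spec_solution; infer_instance

-- ===== CLAIM (what is proved, stated in full; the proofs are below) =====
def Claim_equal_solution : Prop := ∀ (a : List Int) (b : List Int), Dom_solution a b → Spec_solution a b (solution a b)

-- ===== LEMMAS AND PROOFS =====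

-- A's hand-rolled counting loop is collections.Counter: when the key is absent getD is 0
theorem pvBuild_eq_counter (xs : List Int) : pvBuild xs = PySem.Dict.counter xs := by
  have hstep : (fun (d : PySem.Dict Int Int) (x : Int) =>
      if d.contains x then d.insert x (d.getD x 0 + 1) else d.insert x 1)
      = fun d x => d.insert x (d.getD x 0 + 1) := by
    funext d x
    by_cases h : d.contains x = true
    · simp [h]
    · have h0 : d.getD x 0 = 0 :=
        PySem.Dict.getD_of_not_contains d 0 (by simp_all)
      simp [h, h0]
  unfold pvBuild
  rw [hstep, PySem.Dict.foldl_insert_getD_add_one_eq_counter]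

-- Python's dict_a == dict_b on the two counters is exactly 'a is a permutation of b'
theorem pvDictEq_iff (a b : List Int) :
    pvDictEq (PySem.Dict.counter a) (PySem.Dict.counter b) = true ↔ a.Perm b := by
  unfold pvDictEq
  simp only [Bool.and_eq_true, beq_iff_eq, List.all_eq_true]
  constructor
  · rintro ⟨hsize, hall⟩
    rw [List.perm_iff_count]
    intro k
    by_cases hk : k ∈ a
    · have hmem : (k, (a.count k : Int)) ∈ (PySem.Dict.counter a).items := by
        rw [PySem.Dict.items_counter]
        exact List.mem_map_of_mem (by rw [PySem.Set.mem_ofList]; exact hk)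
      have hget := hall _ hmem
      have : (PySem.Dict.counter b).getD k 0 = (a.count k : Int) :=
        PySem.Dict.getD_of_get?_eq_some _ 0 hget
      rw [PySem.Dict.getD_counter] at this
      exact_mod_cast this.symm
    · -- k ∉ a: k ∉ b either, from equal key-set sizes and key-set inclusion
      have hsub : ∀ x ∈ PySem.Set.ofList a, x ∈ PySem.Set.ofList b := by
        intro x hx
        rw [PySem.Set.mem_ofList] at hx ⊢
        have hmem : (x, (a.count x : Int)) ∈ (PySem.Dict.counter a).items := by
          rw [PySem.Dict.items_counter]
          exact List.mem_map_of_mem (by rw [PySem.Set.mem_ofList]; exact hx)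
        have hget := hall _ hmem
        have hc : (PySem.Dict.counter b).contains x = true := by
          rw [PySem.Dict.contains_eq_isSome_get?, hget]; rfl
        rw [PySem.Dict.contains_counter] at hc
        simpa using hc
      have hlen : (PySem.Set.ofList a).length = (PySem.Set.ofList b).length := by
        simpa [PySem.Dict.size, PySem.Dict.items_counter] using hsize
      have hperm : (PySem.Set.ofList a).Perm (PySem.Set.ofList b) :=
        List.Subperm.perm_of_length_le
          ((PySem.Set.nodup_ofList a).subperm hsub) (le_of_eq hlen.symm)
      have hkb : k ∉ b := by
        intro hkb
        exact hk (by
          have : k ∈ PySem.Set.ofList a := hperm.mem_iff.mpr (by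
            rw [PySem.Set.mem_ofList]; exact hkb)
          rwa [PySem.Set.mem_ofList] at this)
      simp [List.count_eq_zero_of_not_mem, hk, hkb]
  · intro hperm
    have hcount : ∀ k, a.count k = b.count k := List.perm_iff_count.mp hperm
    have hsets : (PySem.Set.ofList a).Perm (PySem.Set.ofList b) := by
      rw [List.perm_ext_iff_of_nodup (PySem.Set.nodup_ofList a) (PySem.Set.nodup_ofList b)]
      intro x
      rw [PySem.Set.mem_ofList, PySem.Set.mem_ofList]
      exact hperm.mem_iff
    constructor
    · simp [PySem.Dict.size, PySem.Dict.items_counter, hsets.length_eq]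
    · intro p hp
      rw [PySem.Dict.items_counter] at hp
      obtain ⟨k, hk, rfl⟩ := List.mem_map.mp hp
      have hkb : (k, (b.count k : Int)) ∈ (PySem.Dict.counter b).items := by
        rw [PySem.Dict.items_counter]
        exact List.mem_map_of_mem (hsets.mem_iff.mp hk)
      have := PySem.Dict.get?_of_mem_items _ hkb (PySem.Dict.nodup_keys_counter b)
      simp [this, hcount k]

-- the early-exit mismatch loop returns True iff the total mismatch count stays ≤ 2
theorem pvLoopA_eq (a b : List Int) (idxs : List Int) (cnt : Int) (h : cnt ≤ 2) :
    pvLoopA a b idxs cnt = decide (cnt + (idxs.countP (pvMismatch a b) : Int) ≤ 2) := by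
  induction idxs generalizing cnt with
  | nil => simp [pvLoopA, h]
  | cons i rest ih =>
      rw [pvLoopA]
      by_cases hm : pvMismatch a b i = true
      · rw [List.countP_cons_of_pos hm]
        simp only [hm, if_true]
        by_cases hgt : cnt + 1 > 2
        · rw [if_pos hgt]; symm; rw [decide_eq_false_iff_not]; push_cast; omega
        · rw [if_neg hgt, ih _ (by omega), decide_eq_decide]; push_cast; omega
      · have hm' : pvMismatch a b i = false := by simpa using hm
        rw [List.countP_cons_of_neg (by simp [hm'])]
        simp only [hm', Bool.false_eq_true, if_false]
        rw [if_neg (show ¬ cnt > 2 by omega), ih _ h]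

-- counting mismatched indices over range(len(a)) is counting mismatched pairs of zip(a,b)
theorem pvCountP_range (a b : List Int) (h : a.length = b.length) :
    (PySem.List.pyRange 0 (a.length : Int) 1).countP (pvMismatch a b)
      = ((a.zip b).filter (fun p => p.1 ≠ p.2)).length := by
  rw [show (PySem.List.pyRange 0 (a.length : Int) 1)
        = PySem.List.pyRange 0 (a.length : Int) from rfl,
      PySem.List.pyRange_zero_natCast, List.countP_map]
  induction a generalizing b with
  | nil => simp
  | cons x a' ih =>
      cases b with
      | nil => simp at h
      | cons y b' =>
          have h' : a'.length = b'.length := by simpa using h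
          rw [List.length_cons, List.range_succ_eq_map, List.countP_cons, List.countP_map]
          have h0 : (pvMismatch (x :: a') (y :: b') ∘ fun k : Nat => (k : Int)) 0
              = decide (x ≠ y) := by
            simp [pvMismatch]
          have hsucc : ((pvMismatch (x :: a') (y :: b') ∘ fun k : Nat => (k : Int)) ∘ Nat.succ)
              = (pvMismatch a' b' ∘ fun k : Nat => (k : Int)) := by
            funext k
            simp only [Function.comp]
            have : ((Nat.succ k : Nat) : Int) = ((k : Nat) : Int) + 1 := by push_cast; ring
            simp [pvMismatch]
          rw [hsucc, ih b' h', h0]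
          by_cases hxy : x = y <;> simp [hxy, Nat.add_comm]

-- matched positions cancel: the two columns of l are permutations of each other
-- iff the two columns of the mismatched pairs are
theorem pvBalance (l : List (Int × Int)) (k : Int) :
    (l.map (·.1)).count k + ((l.filter (fun p => p.1 ≠ p.2)).map (·.2)).count k
      = (l.map (·.2)).count k + ((l.filter (fun p => p.1 ≠ p.2)).map (·.1)).count k := by
  induction l with
  | nil => rfl
  | cons p l ih =>
      obtain ⟨x, y⟩ := p
      by_cases hxy : x = y
      · subst hxy
        have hf : List.filter (fun p => decide (p.1 ≠ p.2)) ((x, x) :: l)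
            = List.filter (fun p => decide (p.1 ≠ p.2)) l := by simp
        rw [hf]
        simp only [List.map_cons, List.count_cons]
        split_ifs <;> omega
      · have hf : List.filter (fun p => decide (p.1 ≠ p.2)) ((x, y) :: l)
            = (x, y) :: List.filter (fun p => decide (p.1 ≠ p.2)) l := by simp [hxy]
        rw [hf]
        simp only [List.map_cons, List.count_cons]
        split_ifs <;> omega

theorem pvDiffPerm_iff (l : List (Int × Int)) :
    (l.map (·.1)).Perm (l.map (·.2)) ↔
      (((l.filter (fun p => p.1 ≠ p.2)).map (·.1)).Perm
       ((l.filter (fun p => p.1 ≠ p.2)).map (·.2))) := by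
  rw [List.perm_iff_count, List.perm_iff_count]
  constructor <;> intro hc k <;> have := pvBalance l k <;> have := hc k <;> omega

-- ===== VERDICT (by name: the statement is the Claim_ definition above) =====
theorem solution_spec : Claim_equal_solution := by
  intro a b _
  unfold Spec_solution
  have hd : pvDictEq (pvBuild a) (pvBuild b) = true ↔ a.Perm b := by
    rw [pvBuild_eq_counter, pvBuild_eq_counter]; exact pvDictEq_iff a b
  by_cases hperm : a.Perm b
  · -- dicts equal: A runs its mismatch loop; B's multiset test is true
    have hdt : pvDictEq (pvBuild a) (pvBuild b) = true := hd.mpr hperm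
    have hlen : a.length = b.length := hperm.length_eq
    have hzf : ((a.zip b).map (·.1)).Perm ((a.zip b).map (·.2)) := by
      rw [List.map_fst_zip (le_of_eq hlen), List.map_snd_zip (le_of_eq hlen.symm)]
      exact hperm
    have hsorted : (PySem.List.sorted (((a.zip b).filter (fun p => p.1 ≠ p.2)).map (·.1))
          (fun x => x) false)
        = PySem.List.sorted (((a.zip b).filter (fun p => p.1 ≠ p.2)).map (·.2))
          (fun x => x) false := by
      rw [PySem.List.sorted_id_eq_sorted_id_iff_perm]
      exact (pvDiffPerm_iff (a.zip b)).mp hzf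
    simp only [solution, solution_alt]
    rw [if_neg (by simp [hdt]), if_neg (by simp [hlen]),
        pvLoopA_eq a b _ 0 (by omega), pvCountP_range a b hlen, hsorted]
    simp only [decide_true, Bool.and_true]
    rw [decide_eq_decide]
    omega
  · -- dicts differ: A returns False; B fails the length or the multiset test
    have hdf : pvDictEq (pvBuild a) (pvBuild b) = false := by
      cases hpv : pvDictEq (pvBuild a) (pvBuild b)
      · rfl
      · exact absurd (hd.mp hpv) hperm
    simp only [solution, solution_alt]
    rw [if_pos (by simp [hdf])]
    by_cases hlen : a.length = b.length
    · have hns : ¬ (PySem.List.sorted (((a.zip b).filter (fun p => p.1 ≠ p.2)).map (·.1))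
            (fun x => x) false
          = PySem.List.sorted (((a.zip b).filter (fun p => p.1 ≠ p.2)).map (·.2))
            (fun x => x) false) := by
        intro hs
        rw [PySem.List.sorted_id_eq_sorted_id_iff_perm] at hs
        have hzf := (pvDiffPerm_iff (a.zip b)).mpr hs
        rw [List.map_fst_zip (le_of_eq hlen), List.map_snd_zip (le_of_eq hlen.symm)] at hzf
        exact hperm hzf
      rw [if_neg (by simp [hlen]), decide_eq_false hns, Bool.and_false]
    · rw [if_pos hlen]
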